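-- pv_equiv track=rewrite | github.com/XingCEO/six666 | roads.py | _to_grid
-- ===== SOURCE A (Python) =====
-- from typing import List, Tuple, Optional, Dict
--
-- def _to_grid(entries: List[str], rows: int, max_cols: int) -> List[List[Optional[str]]]:
--     """轉成衍生路的格子（同色往下，變色換列）"""
--     if not entries:
--         return [[None] * max_cols for _ in range(rows)]
--
--     columns: List[List[str]] = []
--     current_col = [entries[0]]
--     for e in entries[1:]:
--         if e == current_col[-1]:
--             current_col.append(e)
--         else:
--             columns.append(current_col)
--             current_col = [e]
--     columns.append(current_col)
--
--     grid = [[None] * max_cols for _ in range(rows)]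
--     col_idx = 0
--     for col_data in columns:
--         for row, val in enumerate(col_data):
--             if row < rows and col_idx < max_cols:
--                 grid[row][col_idx] = val
--         col_idx += 1
--         if col_idx >= max_cols:
--             break
--     return grid
-- ===== SOURCE B (Python) =====
-- from typing import List, Optional
--
-- def _to_grid(entries: List[str], rows: int, max_cols: int) -> List[List[Optional[str]]]:
--     """Single pass: track (col, row) while walking entries; no intermediate columns list."""
--     grid = [[None] * max_cols for _ in range(rows)]
--     if not entries:
--         return grid
--     if max_cols > 0:
--         if rows > 0:
--             grid[0][0] = entries[0]
--         col = 0
--         row = 0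
--         prev = entries[0]
--         for e in entries[1:]:
--             if e == prev:
--                 row += 1
--             else:
--                 col += 1
--                 row = 0
--             if col >= max_cols:
--                 break
--             if row < rows:
--                 grid[row][col] = e
--             prev = e
--     return grid
-- ===== Notes on version B (the rewrite author's own statement) =====
-- stated objective: simpler
-- what changed: Replaces A's two passes (build an intermediate list of runs, then fill the grid column by column) with one pass over entries that keeps (col, row) counters and writes each cell directly, so the intermediate columns structure disappears.
import Mathlib
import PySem

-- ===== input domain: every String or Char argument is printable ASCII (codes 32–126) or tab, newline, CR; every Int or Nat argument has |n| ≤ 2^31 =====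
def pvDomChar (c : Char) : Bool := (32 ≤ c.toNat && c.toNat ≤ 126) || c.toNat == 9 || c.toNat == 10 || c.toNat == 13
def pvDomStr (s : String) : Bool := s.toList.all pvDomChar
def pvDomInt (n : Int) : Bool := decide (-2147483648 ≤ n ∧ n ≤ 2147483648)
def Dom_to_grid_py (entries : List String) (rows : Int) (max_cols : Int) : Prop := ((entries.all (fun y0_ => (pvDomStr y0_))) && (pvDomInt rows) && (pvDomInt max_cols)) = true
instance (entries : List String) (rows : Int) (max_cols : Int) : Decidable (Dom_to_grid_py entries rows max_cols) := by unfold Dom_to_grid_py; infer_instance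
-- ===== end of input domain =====

-- B is a single pass with (col,row) counters instead of A's two passes via an intermediate runs list; same cost.

-- grid[r][c] = some v  (no-op when out of range, as the ports only write in range)
def setCell (g : List (List (Option String))) (r c : Nat) (v : String) : List (List (Option String)) :=
  g.set r ((g.getD r []).set c (some v))

-- [[None] * max_cols for _ in range(rows)]
def mkGrid (rows max_cols : Int) : List (List (Option String)) :=
  (List.range rows.toNat).map (fun _ => List.replicate max_cols.toNat (none : Option String))

-- ===== PORT A =====
-- inner loop: for row, val in enumerate(col_data): if row < rows and col_idx < max_cols: grid[row][col_idx] = val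
def writeColA (rows max_cols : Int) (col : Nat) (g : List (List (Option String))) (c : List String) : List (List (Option String)) :=
  c.zipIdx.foldl (fun g p => if (p.2 : Int) < rows ∧ (col : Int) < max_cols then setCell g p.2 col p.1 else g) g

-- outer loop over columns, with the break after col_idx += 1
def fillA (rows max_cols : Int) : List (List String) → List (List (Option String)) → Nat → List (List (Option String))
  | [], g, _ => g
  | c :: cs, g, col =>
    let g' := writeColA rows max_cols col g c
    if ((col + 1 : Nat) : Int) ≥ max_cols then g' else fillA rows max_cols cs g' (col + 1)

def to_grid_py (entries : List String) (rows : Int) (max_cols : Int) : List (List (Option String)) :=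
  match entries with
  | [] => mkGrid rows max_cols
  | e0 :: rest =>
    let st := rest.foldl
      (fun (st : List (List String) × List String) e =>
        if e = st.2.getLast! then (st.1, st.2 ++ [e]) else (st.1 ++ [st.2], [e]))
      ([], [e0])
    fillA rows max_cols (st.1 ++ [st.2]) (mkGrid rows max_cols) 0

-- ===== PORT B =====
def goB (rows max_cols : Int) : List String → String → Nat → Nat → List (List (Option String)) → List (List (Option String))
  | [], _, _, _, g => g
  | e :: es, prev, col, row, g =>
    let cr := if e = prev then (col, row + 1) else (col + 1, 0)
    if (cr.1 : Int) ≥ max_cols then g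
    else
      goB rows max_cols es e cr.1 cr.2
        (if (cr.2 : Int) < rows then setCell g cr.2 cr.1 e else g)

def to_grid_py_alt (entries : List String) (rows : Int) (max_cols : Int) : List (List (Option String)) :=
  let grid := mkGrid rows max_cols
  match entries with
  | [] => grid
  | e0 :: rest =>
    if max_cols > 0 then
      goB rows max_cols rest e0 0 0 (if rows > 0 then setCell grid 0 0 e0 else grid)
    else grid

-- ===== PRECONDITION & SPEC =====
def Spec_to_grid_py (entries : List String) (rows : Int) (max_cols : Int) (out : List (List (Option String))) : Prop := out = to_grid_py_alt entries rows max_cols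
instance (entries : List String) (rows : Int) (max_cols : Int) (out : List (List (Option String))) : Decidable (Spec_to_grid_py entries rows max_cols out) := by unfold Spec_to_grid_py; infer_instance

-- ===== CLAIM (what is proved, stated in full; the proofs are below) =====
def Claim_equal_to_grid_py : Prop := ∀ (entries : List String) (rows : Int) (max_cols : Int), Dom_to_grid_py entries rows max_cols → Spec_to_grid_py entries rows max_cols (to_grid_py entries rows max_cols)

-- ===== LEMMAS AND PROOFS =====

-- A's grouping step, with explicit starting run `cur`
def runStep (st : List (List String) × List String) (e : String) : List (List String) × List String :=
  if e = st.2.getLast! then (st.1, st.2 ++ [e]) else (st.1 ++ [st.2], [e])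

def columnsOf (cur : List String) (es : List String) : List (List String) :=
  let st := es.foldl runStep ([], cur)
  st.1 ++ [st.2]

theorem getLast!_concat (l : List String) (e : String) : (l ++ [e]).getLast! = e := by
  induction l with
  | nil => rfl
  | cons a l ih =>
    cases l with
    | nil => rfl
    | cons b l => simp [List.getLast!]

theorem foldl_runStep_acc (es : List String) : ∀ (acc : List (List String)) (cur : List String),
    es.foldl runStep (acc, cur)
      = (acc ++ (es.foldl runStep ([], cur)).1, (es.foldl runStep ([], cur)).2) := by
  induction es with
  | nil => intro acc cur; simp
  | cons e es ih =>
    intro acc cur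
    simp only [List.foldl_cons, runStep]
    by_cases h : e = cur.getLast!
    · simp only [if_pos h]
      exact ih acc (cur ++ [e])
    · simp only [if_neg h, List.nil_append]
      rw [ih (acc ++ [cur]) [e], ih [cur] [e]]
      simp

theorem columnsOf_cons (cur : List String) (e : String) (es : List String) :
    columnsOf cur (e :: es)
      = if e = cur.getLast! then columnsOf (cur ++ [e]) es else cur :: columnsOf [e] es := by
  simp only [columnsOf, List.foldl_cons, runStep]
  by_cases h : e = cur.getLast!
  · simp only [if_pos h]
  · simp only [if_neg h, List.nil_append]
    rw [foldl_runStep_acc es [cur] [e]]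
    simp

theorem goB_cons (rows max_cols : Int) (e prev : String) (es : List String)
    (col row : Nat) (g : List (List (Option String))) :
    goB rows max_cols (e :: es) prev col row g
      = (if e = prev then
          (if (col : Int) ≥ max_cols then g
           else goB rows max_cols es e col (row + 1)
                  (if ((row + 1 : Nat) : Int) < rows then setCell g (row + 1) col e else g))
         else
          (if ((col + 1 : Nat) : Int) ≥ max_cols then g
           else goB rows max_cols es e (col + 1) 0
                  (if ((0 : Nat) : Int) < rows then setCell g 0 (col + 1) e else g))) := by
  by_cases h : e = prev <;> simp [goB, h]

theorem writeColA_append (rows max_cols : Int) (col : Nat) (g : List (List (Option String)))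
    (c : List String) (e : String) :
    writeColA rows max_cols col g (c ++ [e])
      = (if (c.length : Int) < rows ∧ (col : Int) < max_cols
          then setCell (writeColA rows max_cols col g c) c.length col e
          else writeColA rows max_cols col g c) := by
  simp [writeColA, List.zipIdx_append, List.foldl_append]

theorem writeColA_singleton (rows max_cols : Int) (col : Nat) (g : List (List (Option String)))
    (e : String) (hcol : (col : Int) < max_cols) :
    writeColA rows max_cols col g [e]
      = (if ((0 : Nat) : Int) < rows then setCell g 0 col e else g) := by
  simp only [writeColA, List.zipIdx, List.foldl_cons, List.foldl_nil]
  by_cases hr : ((0 : Nat) : Int) < rows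
  · rw [if_pos ⟨hr, hcol⟩, if_pos hr]
  · rw [if_neg (fun hc => hr hc.1), if_neg hr]

theorem writeColA_of_ge (rows max_cols : Int) (col : Nat) (h : (col : Int) ≥ max_cols)
    (g : List (List (Option String))) (c : List String) :
    writeColA rows max_cols col g c = g := by
  unfold writeColA
  induction c.zipIdx generalizing g with
  | nil => rfl
  | cons p ps ih =>
    simp only [List.foldl_cons]
    rw [if_neg (fun hc => absurd hc.2 (by omega)), ih]

theorem main_lemma (rows max_cols : Int) (es : List String) :
    ∀ (cur : List String) (g : List (List (Option String))) (col : Nat),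
      cur ≠ [] → (col : Int) < max_cols →
      fillA rows max_cols (columnsOf cur es) g col
        = goB rows max_cols es cur.getLast! col (cur.length - 1)
            (writeColA rows max_cols col g cur) := by
  induction es with
  | nil =>
    intro cur g col hcur hcol
    simp [columnsOf, fillA, goB]
  | cons e es ih =>
    intro cur g col hcur hcol
    have hlen : cur.length - 1 + 1 = cur.length := by
      have := List.length_pos_iff.mpr hcur; omega
    rw [columnsOf_cons, goB_cons]
    by_cases h : e = cur.getLast!
    · simp only [if_pos h]
      rw [if_neg (by omega : ¬ (col : Int) ≥ max_cols)]
      rw [ih (cur ++ [e]) g col (by simp) hcol]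
      rw [getLast!_concat, writeColA_append]
      have h2 : (cur ++ [e]).length - 1 = cur.length - 1 + 1 := by simp; omega
      rw [h2, hlen]
      by_cases hr : (cur.length : Int) < rows
      · rw [if_pos ⟨hr, hcol⟩, if_pos hr]
      · rw [if_neg (fun hc => hr hc.1), if_neg hr]
    · simp only [if_neg h]
      simp only [fillA]
      by_cases hb : ((col + 1 : Nat) : Int) ≥ max_cols
      · rw [if_pos hb, if_pos hb]
      · rw [if_neg hb, if_neg hb]
        rw [ih [e] (writeColA rows max_cols col g cur) (col + 1) (by simp) (by omega)]
        rw [writeColA_singleton rows max_cols (col + 1) _ e (by omega)]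
        rfl

theorem fillA_of_nonpos (rows max_cols : Int) (hmc : max_cols ≤ 0)
    (cols : List (List String)) (g : List (List (Option String))) (hcols : cols ≠ []) :
    fillA rows max_cols cols g 0 = g := by
  cases cols with
  | nil => exact absurd rfl hcols
  | cons c cs =>
    simp only [fillA]
    rw [writeColA_of_ge rows max_cols 0 (by omega) g c, if_pos (by omega)]

-- ===== VERDICT (by name: the statement is the Claim_ definition above) =====
theorem to_grid_py_spec : Claim_equal_to_grid_py := by
  intro entries rows max_cols _
  unfold Spec_to_grid_py to_grid_py to_grid_py_alt
  match entries with
  | [] => rfl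
  | e0 :: rest =>
    simp only []
    have hstep : (fun (st : List (List String) × List String) e =>
        if e = st.2.getLast! then (st.1, st.2 ++ [e]) else (st.1 ++ [st.2], [e])) = runStep := rfl
    by_cases hmc : max_cols > 0
    · rw [if_pos hmc, hstep]
      have hcols : (rest.foldl runStep ([], [e0])).1 ++ [(rest.foldl runStep ([], [e0])).2]
          = columnsOf [e0] rest := rfl
      rw [hcols, main_lemma rows max_cols rest [e0] (mkGrid rows max_cols) 0 (by simp) (by omega)]
      rw [writeColA_singleton rows max_cols 0 _ e0 (by omega)]
      by_cases hr : rows > 0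
      · rw [if_pos (by omega : ((0 : Nat) : Int) < rows), if_pos hr]; rfl
      · rw [if_neg (by omega : ¬ ((0 : Nat) : Int) < rows), if_neg hr]; rfl
    · rw [if_neg hmc, hstep]
      exact fillA_of_nonpos rows max_cols (by omega) _ _ (by simp)
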